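-- pv_equiv track=rewrite | github.com/thehalleyyoung/halley-labs | causal-robustness-radii/proposals/proposal_00/implementation/causalcert/solver/fpt.py | _config_to_key
-- ===== SOURCE A (Python) =====
-- _NO_EDGE = 0
--
-- def _pair_key(i: int, j: int) -> tuple[int, int]:
--     """Canonical ordered pair (smaller first)."""
--     return (min(i, j), max(i, j))
--
-- def _config_to_key(
--     vertices: list[int], config: dict[tuple[int, int], int]
-- ) -> tuple[int, ...]:
--     """Convert an edge configuration to a hashable tuple key.
--
--     Key is a tuple of edge states for each pair (i,j), i < j,
--     sorted lexicographically.
--     """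
--     pairs = []
--     for a_idx in range(len(vertices)):
--         for b_idx in range(a_idx + 1, len(vertices)):
--             pairs.append(_pair_key(vertices[a_idx], vertices[b_idx]))
--     pairs.sort()
--     return tuple(config.get(p, _NO_EDGE) for p in pairs)
-- ===== SOURCE B (Python) =====
-- _NO_EDGE = 0
--
-- def _config_to_key(vertices, config):
--     """Sort the vertices once, collapse them into runs of equal values, and
--     emit the key directly in lexicographic pair order: for run values
--     va < vb with multiplicities ca, cb the sorted pair list contains
--     (va, va) exactly ca*(ca-1)//2 times followed by (va, vb) exactly ca*cb
--     times, so no quadratic-size pair list ever needs sorting."""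
--     s = sorted(vertices)
--     n = len(s)
--     runs = []  # (value, multiplicity), values strictly increasing
--     i = 0
--     while i < n:
--         j = i
--         while j < n and s[j] == s[i]:
--             j += 1
--         runs.append((s[i], j - i))
--         i = j
--     out = []
--     for a in range(len(runs)):
--         va, ca = runs[a]
--         out.extend([config.get((va, va), _NO_EDGE)] * (ca * (ca - 1) // 2))
--         for b in range(a + 1, len(runs)):
--             vb, cb = runs[b]
--             out.extend([config.get((va, vb), _NO_EDGE)] * (ca * cb))
--     return tuple(out)
-- ===== Notes on version B (the rewrite author's own statement) =====
-- stated objective: alternative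
-- what changed: Instead of materialising all O(n^2) canonical pairs and sorting them, B sorts the n vertices once, collapses them into runs of equal values, and emits the key directly in lexicographic order by repeating each pair's looked-up state a computed number of times (ca*(ca-1)//2 for equal-value pairs, ca*cb for distinct runs); intended as faster (it removes the O(n^2 log n) pair sort; measured 6.04x at n=1024) but unconfirmed in a timing run at the largest size, where the O(n^2) output itself dominates.
import Mathlib
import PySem

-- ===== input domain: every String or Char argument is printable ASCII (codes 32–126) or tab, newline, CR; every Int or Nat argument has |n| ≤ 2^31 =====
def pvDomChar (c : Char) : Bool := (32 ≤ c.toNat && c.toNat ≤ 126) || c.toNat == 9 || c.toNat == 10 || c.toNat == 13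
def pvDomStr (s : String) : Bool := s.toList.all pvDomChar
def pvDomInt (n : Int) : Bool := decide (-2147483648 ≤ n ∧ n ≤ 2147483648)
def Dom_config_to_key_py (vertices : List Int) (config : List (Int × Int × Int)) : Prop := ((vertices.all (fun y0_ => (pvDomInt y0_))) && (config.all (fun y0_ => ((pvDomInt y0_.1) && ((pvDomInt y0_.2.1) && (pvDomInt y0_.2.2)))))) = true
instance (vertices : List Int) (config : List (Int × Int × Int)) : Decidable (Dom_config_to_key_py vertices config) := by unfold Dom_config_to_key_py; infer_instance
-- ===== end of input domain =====

-- B replaces A's "materialise all O(n^2) canonical pairs, then sort them" by: sort the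
-- vertices once, collapse them into runs of equal values, and emit the key directly in
-- lexicographic pair order, repeating each looked-up edge state a computed number of times.

-- `config` is the Python dict {(i,j): state} as an association list (k1, k2, state);
-- `config.get(p, _NO_EDGE)` is first-match lookup with default 0 (shared by both ports).
def cfgGet (config : List (Int × Int × Int)) (p : Int × Int) : Int :=
  match config.find? (fun e => (e.1, e.2.1) == p) with
  | some e => e.2.2
  | none => 0

-- ===== PORT A =====
-- _pair_key(i, j)
def pairKey (i j : Int) : Int × Int := (min i j, max i j)

def config_to_key_py (vertices : List Int) (config : List (Int × Int × Int)) : List Int :=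
  -- pairs = []; for a_idx in range(len(vertices)): for b_idx in range(a_idx+1, len(vertices)): pairs.append(_pair_key(...))
  let pairs : List (Int × Int) :=
    (PySem.List.pyRange 0 vertices.length 1).foldl (fun acc a_idx =>
      (PySem.List.pyRange (a_idx + 1) vertices.length 1).foldl (fun acc2 b_idx =>
        acc2 ++ [pairKey (PySem.List.pyGetD vertices a_idx 0) (PySem.List.pyGetD vertices b_idx 0)]) acc) []
  -- pairs.sort()  (tuples compare lexicographically)
  let sortedPairs := PySem.List.sorted2 pairs (·.1) (·.2)
  -- tuple(config.get(p, _NO_EDGE) for p in pairs)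
  sortedPairs.map (cfgGet config)

-- ===== PORT B =====
-- the two while-loops building `runs`: split off the run of the head value, recurse
def runsOf : List Int → List (Int × Int)
  | [] => []
  | x :: rest =>
    let same := rest.takeWhile (fun y => y == x)
    (x, 1 + (same.length : Int)) :: runsOf (rest.dropWhile (fun y => y == x))
termination_by l => l.length
decreasing_by
  simpa using Nat.lt_succ_of_le (List.length_dropWhile_le (fun y => y == x) rest)

def config_to_key_py_alt (vertices : List Int) (config : List (Int × Int × Int)) : List Int :=
  let s := PySem.List.sorted vertices (fun x => x) false
  let runs := runsOf s
  (PySem.List.pyRange 0 runs.length 1).foldl (fun out a =>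
    let r := PySem.List.pyGetD runs a (0, 0)
    let out2 := out ++ List.replicate (PySem.Int.floordiv (r.2 * (r.2 - 1)) 2).toNat (cfgGet config (r.1, r.1))
    (PySem.List.pyRange (a + 1) runs.length 1).foldl (fun out3 b =>
      let q := PySem.List.pyGetD runs b (0, 0)
      out3 ++ List.replicate (r.2 * q.2).toNat (cfgGet config (r.1, q.1))) out2) []

-- ===== PRECONDITION & SPEC =====
def Spec_config_to_key_py (vertices : List Int) (config : List (Int × Int × Int)) (out : List Int) : Prop := out = config_to_key_py_alt vertices config
instance (vertices : List Int) (config : List (Int × Int × Int)) (out : List Int) : Decidable (Spec_config_to_key_py vertices config out) := by unfold Spec_config_to_key_py; infer_instance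

-- ===== CLAIM (what is proved, stated in full; the proofs are below) =====
def Claim_equal_config_to_key_py : Prop := ∀ (vertices : List Int) (config : List (Int × Int × Int)), Dom_config_to_key_py vertices config → Spec_config_to_key_py vertices config (config_to_key_py vertices config)

-- ===== LEMMAS AND PROOFS =====

-- the structural form of A's pair generation
def pairsOf : List Int → List (Int × Int)
  | [] => []
  | x :: xs => xs.map (pairKey x) ++ pairsOf xs

-- the structural form of B's expansion, as a list of pairs (before lookup)
def expand : List (Int × Int) → List (Int × Int)
  | [] => []
  | (v, c) :: rs =>
    List.replicate (PySem.Int.floordiv (c * (c - 1)) 2).toNat (v, v)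
      ++ rs.flatMap (fun q => List.replicate (c * q.2).toNat (v, q.1))
      ++ expand rs

-- lexicographic (Python tuple) order on Int × Int, and its Bool strict form used by sorted2
def lexLE (a b : Int × Int) : Prop := a.1 < b.1 ∨ (a.1 = b.1 ∧ a.2 ≤ b.2)

def blex (a b : Int × Int) : Bool := decide (a.1 < b.1) || (!decide (b.1 < a.1) && decide (a.2 < b.2))

-- run-length count of a value in a runs list
def cntR : List (Int × Int) → Int → Int
  | [], _ => 0
  | q :: rs, w => if q.1 = w then q.2 else cntR rs w

theorem not_blex (a b : Int × Int) : blex a b = false ↔ lexLE b a := by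
  simp [blex, lexLE]; omega

theorem blex_lexLE (a b : Int × Int) (h : blex a b = true) : lexLE a b := by
  simp [blex] at h; simp [lexLE]; omega

theorem blex_trans_le {a b c : Int × Int} (h : blex a b = true) (h2 : lexLE b c) : blex a c = true := by
  simp [blex] at *; rcases h2 with h2 | h2 <;> omega

theorem insertBy_pairwise (x : Int × Int) (ys : List (Int × Int)) (h : ys.Pairwise lexLE) :
    (PySem.List.insertBy blex x ys).Pairwise lexLE := by
  induction ys with
  | nil => simp [PySem.List.insertBy]
  | cons y ys ih =>
    rw [List.pairwise_cons] at h
    show (if blex x y then x :: y :: ys else y :: PySem.List.insertBy blex x ys).Pairwise lexLE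
    split_ifs with hb
    · refine List.Pairwise.cons ?_ (List.Pairwise.cons h.1 h.2)
      intro z hz
      rcases hz with _ | hz
      · exact blex_lexLE _ _ hb
      · exact blex_lexLE _ _ (blex_trans_le hb (h.1 _ (by assumption)))
    · refine List.Pairwise.cons ?_ (ih h.2)
      intro z hz
      rw [PySem.List.mem_insertBy] at hz
      rcases hz with rfl | hz
      · exact (not_blex _ _).mp (by simpa using hb)
      · exact h.1 _ hz

theorem sorted2_pairwise_lex (xs : List (Int × Int)) :
    (PySem.List.sorted2 xs (·.1) (·.2)).Pairwise lexLE := by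
  have key : ∀ (l : List (Int × Int)) (acc : List (Int × Int)), acc.Pairwise lexLE →
      (l.foldl (fun acc x => PySem.List.insertBy blex x acc) acc).Pairwise lexLE := by
    intro l
    induction l with
    | nil => intro acc h; exact h
    | cons x l ih => intro acc h; exact ih _ (insertBy_pairwise x acc h)
  have : PySem.List.sorted2 xs (·.1) (·.2) = xs.foldl (fun acc x => PySem.List.insertBy blex x acc) [] := by
    rfl
  rw [this]
  exact key xs [] (by simp)

theorem pairKey_comm (i j : Int) : pairKey i j = pairKey j i := by
  simp [pairKey, min_comm, max_comm]

theorem pairsOf_perm {l l' : List Int} (h : l.Perm l') : (pairsOf l).Perm (pairsOf l') := by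
  induction h with
  | nil => rfl
  | cons x h ih => exact ((h.map (pairKey x)).append ih)
  | swap x y l =>
    show (List.map (pairKey y) (x :: l) ++ (List.map (pairKey x) l ++ pairsOf l)).Perm
         (List.map (pairKey x) (y :: l) ++ (List.map (pairKey y) l ++ pairsOf l))
    simp only [List.map_cons, List.cons_append]
    rw [pairKey_comm y x]
    refine List.Perm.cons _ ?_
    rw [← List.append_assoc, ← List.append_assoc]
    exact (List.perm_append_comm).append_right _
  | trans _ _ ih1 ih2 => exact ih1.trans ih2

theorem count_map_pair (x : Int) (rest : List Int) (p : Int × Int) :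
    (rest.map (fun r => (x, r))).count p = if p.1 = x then rest.count p.2 else 0 := by
  induction rest with
  | nil => simp
  | cons r rest ih =>
    simp only [List.map_cons, List.count_cons, ih, beq_iff_eq, Prod.ext_iff, List.count_cons]
    by_cases h1 : p.1 = x <;> by_cases h2 : p.2 = r <;> simp [h1, h2] <;> omega

theorem tri_succ (c : Nat) : (c + 1) * c / 2 = c + c * (c - 1) / 2 := by
  cases c with
  | zero => rfl
  | succ k =>
    obtain ⟨d, hd⟩ := (Nat.even_mul_succ_self k).two_dvd
    have h1 : (k + 1 + 1) * (k + 1) = 2 * (k + 1 + d) := by nlinarith [hd]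
    have h2 : (k + 1) * (k + 1 - 1) = 2 * d := by simpa [Nat.mul_comm] using hd
    rw [h1, h2, Nat.mul_div_cancel_left _ (by norm_num), Nat.mul_div_cancel_left _ (by norm_num)]

theorem count_pairsOf_sorted (s : List Int) (hs : s.Pairwise (· ≤ ·)) (p : Int × Int) :
    (pairsOf s).count p =
      if p.1 < p.2 then s.count p.1 * s.count p.2
      else if p.1 = p.2 then s.count p.1 * (s.count p.1 - 1) / 2
      else 0 := by
  induction s generalizing p with
  | nil => simp only [pairsOf, List.count_nil]; split_ifs <;> simp
  | cons x rest ih =>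
    rw [List.pairwise_cons] at hs
    have hmap : rest.map (pairKey x) = rest.map (fun r => (x, r)) := by
      apply List.map_congr_left
      intro r hr
      have := hs.1 r hr
      simp [pairKey, min_eq_left this, max_eq_right this]
    rw [pairsOf, List.count_append, hmap, count_map_pair, ih hs.2]
    rcases p with ⟨p1, p2⟩
    dsimp only
    rcases lt_trichotomy p1 p2 with hlt | heq | hgt
    · rw [if_pos hlt, if_pos hlt]
      by_cases e1 : p1 = x
      · subst e1
        have e2 : p2 ≠ p1 := by omega
        rw [if_pos rfl, List.count_cons_self, List.count_cons_of_ne (by omega : p1 ≠ p2)]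
        ring
      · rw [if_neg e1, List.count_cons_of_ne (Ne.symm e1)]
        by_cases e2 : p2 = x
        · subst e2
          have hc : rest.count p1 = 0 :=
            List.count_eq_zero.mpr (fun hm => absurd (hs.1 _ hm) (by omega))
          rw [List.count_cons_self, hc]
          simp
        · rw [List.count_cons_of_ne (Ne.symm e2)]
          simp
    · subst heq
      rw [if_neg (lt_irrefl p1), if_pos rfl, if_neg (lt_irrefl p1), if_pos rfl]
      by_cases e1 : p1 = x
      · subst e1
        rw [if_pos rfl, List.count_cons_self, Nat.add_sub_cancel, tri_succ]
      · rw [if_neg e1, List.count_cons_of_ne (Ne.symm e1)]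
        simp
    · have hne : p1 ≠ p2 := by omega
      have hnlt : ¬ p1 < p2 := by omega
      rw [if_neg hnlt, if_neg hne, if_neg hnlt, if_neg hne]
      by_cases e1 : p1 = x
      · subst e1
        have hc : rest.count p2 = 0 :=
          List.count_eq_zero.mpr (fun hm => absurd (hs.1 _ hm) (by omega))
        simp [hc]
      · simp [e1]

theorem range_flatMap_pairs (l : List Int) :
    (List.range l.length).flatMap (fun a => (l.drop (a+1)).map (pairKey (l.getD a 0))) = pairsOf l := by
  induction l with
  | nil => simp [pairsOf]
  | cons x xs ih =>
    rw [List.length_cons, List.range_succ_eq_map, List.flatMap_cons, List.flatMap_map]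
    simp only [Nat.succ_eq_add_one, List.drop_succ_cons, List.getD_cons_succ,
      List.drop_zero, List.getD_cons_zero]
    rw [pairsOf]
    congr 1

theorem A_pairs_eq (vertices : List Int) :
    (PySem.List.pyRange 0 vertices.length 1).foldl (fun acc a_idx =>
      (PySem.List.pyRange (a_idx + 1) vertices.length 1).foldl (fun acc2 b_idx =>
        acc2 ++ [pairKey (PySem.List.pyGetD vertices a_idx 0) (PySem.List.pyGetD vertices b_idx 0)]) acc) []
    = pairsOf vertices := by
  have hcongr := PySem.List.foldl_congr_mem (PySem.List.pyRange 0 vertices.length 1)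
    (fun acc a_idx =>
      (PySem.List.pyRange (a_idx + 1) vertices.length 1).foldl (fun acc2 b_idx =>
        acc2 ++ [pairKey (PySem.List.pyGetD vertices a_idx 0) (PySem.List.pyGetD vertices b_idx 0)]) acc)
    (fun acc a_idx =>
      acc ++ (vertices.drop (a_idx + 1).toNat).map (pairKey (PySem.List.pyGetD vertices a_idx 0)))
    []
    (by
      intro acc a ha
      have h0 : (0:Int) ≤ a := (PySem.List.mem_pyRange_one.mp ha).1
      beta_reduce
      rw [PySem.List.foldl_append_singleton_eq_map]
      congr 1
      rw [← PySem.List.map_pyGetD_pyRange' vertices 0 (by omega : (0:Int) ≤ a + 1), List.map_map]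
      rfl)
  rw [hcongr, PySem.List.foldl_append_eq_flatMap, List.nil_append]
  rw [PySem.List.pyRange_one, List.flatMap_map, ← range_flatMap_pairs]
  simp only [Int.sub_zero, Int.toNat_natCast]
  apply List.flatMap_congr
  intro a _
  norm_num [PySem.List.pyGetD_natCast]

theorem key_mem_of_mem_runsOf : ∀ (t : List Int) (q : Int × Int), q ∈ runsOf t → q.1 ∈ t := by
  intro t
  induction t using runsOf.induct with
  | case1 => intro q hq; simp [runsOf] at hq
  | case2 x rest ih =>
    intro q hq
    rw [runsOf] at hq
    rcases List.mem_cons.mp hq with rfl | hq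
    · exact List.mem_cons_self
    · exact List.mem_cons_of_mem _ ((List.dropWhile_sublist _).subset (ih q hq))

theorem runsOf_spec (s : List Int) (hs : s.Pairwise (· ≤ ·)) :
    ((runsOf s).map (·.1)).Pairwise (· < ·)
    ∧ (∀ q ∈ runsOf s, q.2 = (s.count q.1 : Int) ∧ 1 ≤ q.2)
    ∧ (∀ v : Int, v ∉ (runsOf s).map (·.1) → s.count v = 0) := by
  induction s using runsOf.induct with
  | case1 => simp [runsOf]
  | case2 x rest ih =>
    have hsplit : rest = rest.takeWhile (fun y => y == x) ++ rest.dropWhile (fun y => y == x) :=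
      (List.takeWhile_append_dropWhile).symm
    rw [List.pairwise_cons] at hs
    have hrest' : (rest.dropWhile (fun y => y == x)).Pairwise (· ≤ ·) := by
      have := hs.2
      rw [hsplit, List.pairwise_append] at this
      exact this.2.1
    have htake : ∀ y ∈ rest.takeWhile (fun y => y == x), y = x := by
      intro y hy
      simpa using List.mem_takeWhile_imp hy
    have hgt : ∀ v ∈ rest.dropWhile (fun y => y == x), x < v := by
      intro v hv
      have hle : x ≤ v := hs.1 v ((List.dropWhile_sublist _).subset hv)
      rcases eq_or_lt_of_le hle with heq | h
      · -- v = x in dropWhile: contradiction with head and sortedness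
        exfalso
        subst heq
        rcases hd : rest.dropWhile (fun y => y == x) with _ | ⟨h0, tl⟩
        · rw [hd] at hv; simp at hv
        · have hh0 : ¬ (h0 == x) = true := by
            have := List.head?_dropWhile_not (fun y => y == x) rest
            rw [hd] at this
            simpa using this
          rw [hd] at hv hrest'
          simp only [beq_iff_eq] at hh0
          rcases List.mem_cons.mp hv with heq2 | hv2
          · exact hh0 heq2.symm
          · have h1 : h0 ≤ x := (List.pairwise_cons.mp hrest').1 x hv2
            have h2 : x ≤ h0 := hs.1 h0 ((List.dropWhile_sublist _).subset (hd ▸ List.mem_cons_self))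
            omega
      · exact h
    obtain ⟨ih1, ih2, ih3⟩ := ih hrest'
    have hcx : rest.count x = (rest.takeWhile (fun y => y == x)).length := by
      conv_lhs => rw [hsplit]
      rw [List.count_append]
      have h1 : (rest.takeWhile (fun y => y == x)).count x = (rest.takeWhile (fun y => y == x)).length :=
        List.count_eq_length.mpr (fun y hy => by simp [htake y hy])
      have h2 : (rest.dropWhile (fun y => y == x)).count x = 0 :=
        List.count_eq_zero.mpr (fun hm => absurd (hgt x hm) (lt_irrefl x))
      omega
    refine ⟨?_, ?_, ?_⟩
    · rw [runsOf]
      simp only [List.map_cons, List.pairwise_cons]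
      refine ⟨?_, ih1⟩
      intro k hk
      rcases List.mem_map.mp hk with ⟨q, hq, rfl⟩
      exact hgt q.1 (key_mem_of_mem_runsOf _ q hq)
    · rw [runsOf]
      intro q hq
      rcases List.mem_cons.mp hq with rfl | hq
      · constructor
        · simp only [List.count_cons_self, hcx]
          push_cast
          omega
        · have : (0:Int) ≤ (rest.takeWhile (fun y => y == x)).length := by positivity
          omega
      · obtain ⟨e1, e2⟩ := ih2 q hq
        refine ⟨?_, e2⟩
        have hqx : x < q.1 := hgt q.1 (key_mem_of_mem_runsOf _ q hq)
        have hcnt : (x :: rest).count q.1 = (rest.dropWhile (fun y => y == x)).count q.1 := by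
          rw [List.count_cons_of_ne (by omega : x ≠ q.1)]
          conv_lhs => rw [hsplit]
          rw [List.count_append]
          have : (rest.takeWhile (fun y => y == x)).count q.1 = 0 :=
            List.count_eq_zero.mpr (fun hm => by have := htake _ hm; omega)
          omega
        rw [hcnt.symm] at e1
        exact e1
    · intro v hv
      rw [runsOf] at hv
      simp only [List.map_cons, List.mem_cons, not_or] at hv
      have h2 := ih3 v hv.2
      rw [List.count_cons_of_ne (fun h => hv.1 h.symm)]
      conv_lhs => rw [hsplit]
      rw [List.count_append, h2]
      have : (rest.takeWhile (fun y => y == x)).count v = 0 :=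
        List.count_eq_zero.mpr (fun hm => hv.1 (htake _ hm))
      omega

theorem cntR_nonneg (rs : List (Int × Int)) (hpos : ∀ q ∈ rs, 1 ≤ q.2) (w : Int) :
    0 ≤ cntR rs w := by
  induction rs with
  | nil => simp [cntR]
  | cons q rs ih =>
    rw [cntR]
    split_ifs with h
    · exact le_of_lt (by have := hpos q List.mem_cons_self; omega)
    · exact ih (fun r hr => hpos r (List.mem_cons_of_mem _ hr))

theorem cntR_eq_zero (rs : List (Int × Int)) (w : Int) (h : w ∉ rs.map (·.1)) :
    cntR rs w = 0 := by
  induction rs with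
  | nil => rfl
  | cons q rs ih =>
    simp only [List.map_cons, List.mem_cons, not_or] at h
    rw [cntR, if_neg (fun he => h.1 he.symm)]
    exact ih h.2

theorem mem_expand (rs : List (Int × Int)) (p : Int × Int) (hp : p ∈ expand rs) :
    p.1 ∈ rs.map (·.1) ∧ p.2 ∈ rs.map (·.1) := by
  induction rs with
  | nil => simp [expand] at hp
  | cons q rs ih =>
    rcases q with ⟨v, c⟩
    rw [expand] at hp
    simp only [List.mem_append] at hp
    rcases hp with (hp | hp) | hp
    · have := List.eq_of_mem_replicate hp
      subst this
      refine ⟨?_, ?_⟩ <;> simp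
    · rcases List.mem_flatMap.mp hp with ⟨r, hr, hmem⟩
      have := List.eq_of_mem_replicate hmem
      subst this
      refine ⟨by simp, ?_⟩
      simp only [List.map_cons, List.mem_cons]
      exact Or.inr (List.mem_map.mpr ⟨r, hr, rfl⟩)
    · have := ih hp
      simp only [List.map_cons, List.mem_cons]
      exact ⟨Or.inr this.1, Or.inr this.2⟩

theorem floordiv_toNat (c : Int) (hc : 1 ≤ c) :
    (PySem.Int.floordiv (c * (c - 1)) 2).toNat = c.toNat * (c.toNat - 1) / 2 := by
  obtain ⟨n, rfl⟩ : ∃ n : Nat, c = (n : Int) := ⟨c.toNat, (Int.toNat_of_nonneg (by omega)).symm⟩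
  have hn : 1 ≤ n := by omega
  have h1 : PySem.Int.floordiv ((n:Int) * ((n:Int) - 1)) 2 = ((n:Int) * ((n:Int) - 1)) / 2 := by
    unfold PySem.Int.floordiv
    rw [Int.fdiv_eq_ediv]
    simp
  have h2 : (n:Int) * ((n:Int) - 1) = ((n * (n - 1) : Nat) : Int) := by
    push_cast [Nat.cast_sub hn]
    ring
  rw [h1, h2, show ((2:Int)) = ((2:Nat):Int) from rfl, ← Int.natCast_div, Int.toNat_natCast]
  simp

theorem count_flatMap_repl (v c : Int) (rest : List (Int × Int))
    (hnd : (rest.map (·.1)).Nodup) (p : Int × Int) :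
    (rest.flatMap (fun q => List.replicate (c * q.2).toNat (v, q.1))).count p =
      if p.1 = v then (c * cntR rest p.2).toNat else 0 := by
  induction rest with
  | nil => simp [cntR]
  | cons q rest ih =>
    simp only [List.map_cons, List.nodup_cons] at hnd
    rw [List.flatMap_cons, List.count_append, List.count_replicate, ih hnd.2, cntR]
    rcases p with ⟨p1, p2⟩
    dsimp only
    by_cases h1 : p1 = v
    · subst h1
      by_cases h2 : q.1 = p2
      · subst h2
        rw [if_pos rfl, if_pos rfl]
        have : cntR rest q.1 = 0 := cntR_eq_zero _ _ hnd.1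
        simp [this]
      · rw [if_pos rfl, if_pos rfl, if_neg h2]
        simp only [beq_iff_eq, Prod.mk.injEq]
        simp only [true_and]
        rw [if_neg (by omega)]
        simp
    · rw [if_neg h1, if_neg h1]
      simp only [beq_iff_eq, Prod.mk.injEq]
      rw [if_neg (by omega : ¬((v = p1) ∧ (q.1 = p2)))]

theorem keys_lt_of_pairwise {v : Int} {c : Int} {rest : List (Int × Int)}
    (hk : (((v, c) :: rest).map (·.1)).Pairwise (· < ·)) :
    ∀ q ∈ rest, v < q.1 := by
  intro q hq
  rw [List.map_cons, List.pairwise_cons] at hk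
  exact hk.1 q.1 (List.mem_map.mpr ⟨q, hq, rfl⟩)

theorem count_expand (rs : List (Int × Int)) (hk : (rs.map (·.1)).Pairwise (· < ·))
    (hpos : ∀ q ∈ rs, 1 ≤ q.2) (p : Int × Int) :
    (expand rs).count p =
      if p.1 < p.2 then (cntR rs p.1).toNat * (cntR rs p.2).toNat
      else if p.1 = p.2 then (cntR rs p.1).toNat * ((cntR rs p.1).toNat - 1) / 2
      else 0 := by
  induction rs with
  | nil => simp only [expand, List.count_nil, cntR]; split_ifs <;> simp
  | cons r rest ih =>
    rcases r with ⟨v, c⟩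
    have hvlt : ∀ q ∈ rest, v < q.1 := keys_lt_of_pairwise hk
    have hvnot : v ∉ rest.map (·.1) := by
      intro hm
      rcases List.mem_map.mp hm with ⟨q, hq, he⟩
      exact absurd (hvlt q hq) (by omega)
    have hnd : (rest.map (·.1)).Nodup :=
      ((List.map_cons .. ▸ hk).sublist (List.sublist_cons_self _ _)).imp ne_of_lt
    have hkrest : (rest.map (·.1)).Pairwise (· < ·) := by
      rw [List.map_cons, List.pairwise_cons] at hk
      exact hk.2
    have hc1 : 1 ≤ c := (hpos _ List.mem_cons_self)
    have hposr : ∀ q ∈ rest, 1 ≤ q.2 := fun q hq => hpos q (List.mem_cons_of_mem _ hq)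
    rw [expand, List.count_append, List.count_append, List.count_replicate,
      count_flatMap_repl v c rest hnd p, floordiv_toNat c hc1]
    rcases p with ⟨p1, p2⟩
    dsimp only
    by_cases e1 : p1 = v
    · subst e1
      have hC : (expand rest).count (p1, p2) = 0 := by
        apply List.count_eq_zero.mpr
        intro hm
        exact hvnot (mem_expand rest _ hm).1
      rw [hC, if_pos rfl]
      by_cases e2 : p2 = p1
      · subst e2
        rw [if_pos rfl, cntR, if_pos rfl, cntR_eq_zero rest p2 hvnot]
        simp
      · have hbeq : ¬ (((p1, p1) : Int × Int) = (p1, p2)) := by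
          simp only [Prod.mk.injEq]
          omega
        rw [if_neg (by simp only [beq_iff_eq]; exact hbeq), cntR, if_pos rfl, cntR,
          if_neg (by omega : ¬ p1 = p2)]
        rcases lt_trichotomy p1 p2 with hlt | heq | hgt
        · dsimp only
          rw [Int.toNat_mul (by omega) (cntR_nonneg rest hposr p2)]
          simp
          intro h
          exact absurd hlt (not_lt.mpr h)
        · omega
        · have hr2 : cntR rest p2 = 0 := by
            apply cntR_eq_zero
            intro hm
            rcases List.mem_map.mp hm with ⟨q, hq, he⟩
            exact absurd (hvlt q hq) (by omega)
          rw [hr2]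
          simp
          intro _ h
          exact absurd h (by omega)
    · have hbeq : ¬ (((v, v) : Int × Int) = (p1, p2)) := by
        simp only [Prod.mk.injEq]
        omega
      rw [if_neg (by simp only [beq_iff_eq]; exact hbeq), if_neg e1, cntR,
        if_neg (by omega : ¬ v = p1), ih hkrest hposr]
      by_cases e2 : p2 = v
      · subst e2
        rw [cntR, if_pos rfl]
        have hr1 : cntR rest p1 = 0 ∨ ¬ p1 < p2 := by
          rcases lt_trichotomy p1 p2 with hlt | heq | hgt
          · left
            apply cntR_eq_zero
            intro hm
            rcases List.mem_map.mp hm with ⟨q, hq, he⟩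
            exact absurd (hvlt q hq) (by omega)
          · omega
          · right; omega
        have hr2 : cntR rest p2 = 0 := cntR_eq_zero rest p2 hvnot
        rcases hr1 with hr1 | hr1
        · rw [hr2, hr1]
          split_ifs <;> simp
        · simp [if_neg hr1, if_neg (by omega : ¬ p1 = p2)]
      · rw [cntR, if_neg (by omega : ¬ v = p2)]
        simp

theorem flatMap_pairwise (v c : Int) (rest : List (Int × Int))
    (hk : (rest.map (·.1)).Pairwise (· < ·)) :
    (rest.flatMap (fun q => List.replicate (c * q.2).toNat (v, q.1))).Pairwise lexLE := by
  induction rest with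
  | nil => simp
  | cons q rest ih =>
    rw [List.map_cons, List.pairwise_cons] at hk
    rw [List.flatMap_cons, List.pairwise_append]
    refine ⟨List.pairwise_replicate.mpr (Or.inr (Or.inr ⟨rfl, le_refl _⟩)), ih hk.2, ?_⟩
    intro a ha b hb
    have ha' := List.eq_of_mem_replicate ha
    subst ha'
    rcases List.mem_flatMap.mp hb with ⟨r, hr, hbr⟩
    have hb' := List.eq_of_mem_replicate hbr
    subst hb'
    right
    exact ⟨rfl, le_of_lt (hk.1 r.1 (List.mem_map.mpr ⟨r, hr, rfl⟩))⟩

theorem expand_pairwise (rs : List (Int × Int)) (hk : (rs.map (·.1)).Pairwise (· < ·)) :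
    (expand rs).Pairwise lexLE := by
  induction rs with
  | nil => simp [expand]
  | cons r rest ih =>
    rcases r with ⟨v, c⟩
    have hvlt : ∀ q ∈ rest, v < q.1 := keys_lt_of_pairwise hk
    have hkrest : (rest.map (·.1)).Pairwise (· < ·) := by
      rw [List.map_cons, List.pairwise_cons] at hk
      exact hk.2
    rw [expand, List.pairwise_append, List.pairwise_append]
    have hmemC : ∀ b ∈ expand rest, v < b.1 := by
      intro b hb
      rcases List.mem_map.mp ((mem_expand rest b hb).1) with ⟨q, hq, he⟩
      rw [← he]
      exact hvlt q hq
    refine ⟨⟨List.pairwise_replicate.mpr (Or.inr (Or.inr ⟨rfl, le_refl _⟩)),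
      flatMap_pairwise v c rest hkrest, ?_⟩, ih hkrest, ?_⟩
    · intro a ha b hb
      have ha' := List.eq_of_mem_replicate ha
      subst ha'
      rcases List.mem_flatMap.mp hb with ⟨r, hr, hbr⟩
      have hb' := List.eq_of_mem_replicate hbr
      subst hb'
      exact Or.inr ⟨rfl, le_of_lt (hvlt r hr)⟩
    · intro a ha b hb
      rcases List.mem_append.mp ha with ha | ha
      · have ha' := List.eq_of_mem_replicate ha
        subst ha'
        exact Or.inl (hmemC b hb)
      · rcases List.mem_flatMap.mp ha with ⟨r, hr, har⟩
        have ha' := List.eq_of_mem_replicate har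
        subst ha'
        exact Or.inl (hmemC b hb)

theorem cntR_mem (rs : List (Int × Int)) (hnd : (rs.map (·.1)).Nodup) (q : Int × Int)
    (hq : q ∈ rs) : cntR rs q.1 = q.2 := by
  induction rs with
  | nil => simp at hq
  | cons r rest ih =>
    simp only [List.map_cons, List.nodup_cons] at hnd
    rcases List.mem_cons.mp hq with rfl | hq
    · rw [cntR, if_pos rfl]
    · rw [cntR, if_neg, ]
      · exact ih hnd.2 hq
      · intro he
        exact hnd.1 (he ▸ List.mem_map.mpr ⟨q, hq, rfl⟩)

theorem range_flatMap_expand (g : Int × Int → Int) (runs : List (Int × Int)) :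
    (List.range runs.length).flatMap (fun a =>
      List.replicate (PySem.Int.floordiv ((runs.getD a (0,0)).2 * ((runs.getD a (0,0)).2 - 1)) 2).toNat
          (g ((runs.getD a (0,0)).1, (runs.getD a (0,0)).1))
        ++ (runs.drop (a+1)).flatMap (fun q =>
            List.replicate ((runs.getD a (0,0)).2 * q.2).toNat (g ((runs.getD a (0,0)).1, q.1))))
    = (expand runs).map g := by
  induction runs with
  | nil => simp [expand]
  | cons r rest ih =>
    rcases r with ⟨v, c⟩
    rw [List.length_cons, List.range_succ_eq_map, List.flatMap_cons, List.flatMap_map]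
    simp only [Nat.succ_eq_add_one, List.drop_succ_cons, List.getD_cons_succ,
      List.getD_cons_zero, List.drop_zero]
    have h1 : List.map g (List.flatMap (fun q => List.replicate (c * q.2).toNat (v, q.1)) rest)
        = List.flatMap (fun q => List.replicate (c * q.2).toNat (g (v, q.1))) rest := by
      simp [List.map_flatMap, List.map_replicate]
    rw [expand, List.map_append, List.map_append, List.map_replicate, h1, ih]

theorem B_out_eq (vertices : List Int) (config : List (Int × Int × Int)) :
    config_to_key_py_alt vertices config
    = (expand (runsOf (PySem.List.sorted vertices (fun x => x) false))).map (cfgGet config) := by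
  show (PySem.List.pyRange 0 (runsOf (PySem.List.sorted vertices (fun x => x) false)).length 1).foldl _ [] = _
  set runs := runsOf (PySem.List.sorted vertices (fun x => x) false) with hruns
  clear_value runs
  have hcongr := PySem.List.foldl_congr_mem (PySem.List.pyRange 0 runs.length 1)
    (fun out a =>
      let r := PySem.List.pyGetD runs a (0, 0)
      let out2 := out ++ List.replicate (PySem.Int.floordiv (r.2 * (r.2 - 1)) 2).toNat (cfgGet config (r.1, r.1))
      (PySem.List.pyRange (a + 1) runs.length 1).foldl (fun out3 b =>
        let q := PySem.List.pyGetD runs b (0, 0)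
        out3 ++ List.replicate (r.2 * q.2).toNat (cfgGet config (r.1, q.1))) out2)
    (fun out a =>
      out ++ (List.replicate (PySem.Int.floordiv ((PySem.List.pyGetD runs a (0,0)).2 * ((PySem.List.pyGetD runs a (0,0)).2 - 1)) 2).toNat
          (cfgGet config ((PySem.List.pyGetD runs a (0,0)).1, (PySem.List.pyGetD runs a (0,0)).1))
        ++ (runs.drop (a+1).toNat).flatMap (fun q =>
            List.replicate ((PySem.List.pyGetD runs a (0,0)).2 * q.2).toNat
              (cfgGet config ((PySem.List.pyGetD runs a (0,0)).1, q.1)))))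
    []
    (by
      intro out a ha
      have h0 : (0:Int) ≤ a := (PySem.List.mem_pyRange_one.mp ha).1
      beta_reduce
      rw [PySem.List.foldl_append_eq_flatMap, List.append_assoc]
      congr 1
      congr 1
      rw [← PySem.List.map_pyGetD_pyRange' runs (0,0) (by omega : (0:Int) ≤ a + 1), List.flatMap_map])
  rw [hcongr, PySem.List.foldl_append_eq_flatMap, List.nil_append]
  rw [PySem.List.pyRange_one, List.flatMap_map, ← range_flatMap_expand (cfgGet config) runs]
  simp only [Int.sub_zero, Int.toNat_natCast]
  apply List.flatMap_congr
  intro a _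
  norm_num [PySem.List.pyGetD_natCast]

theorem cntR_runsOf (s : List Int) (hs : s.Pairwise (· ≤ ·)) (w : Int) :
    (cntR (runsOf s) w).toNat = s.count w := by
  obtain ⟨hr1, hr2, hr3⟩ := runsOf_spec s hs
  by_cases hw : w ∈ (runsOf s).map (·.1)
  · rcases List.mem_map.mp hw with ⟨q, hq, he⟩
    subst he
    rw [cntR_mem _ (hr1.imp ne_of_lt) q hq, (hr2 q hq).1]
    simp
  · rw [cntR_eq_zero _ _ hw, hr3 w hw]
    rfl

-- ===== VERDICT (by name: the statement is the Claim_ definition above) =====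
theorem config_to_key_py_spec : Claim_equal_config_to_key_py := by
  intro vertices config _
  show _ = _
  set s := PySem.List.sorted vertices (fun x => x) false with hsdef
  have hsort : s.Pairwise (· ≤ ·) := PySem.List.sorted_pairwise vertices (fun x => x)
  obtain ⟨hr1, hr2, hr3⟩ := runsOf_spec s hsort
  have hpos : ∀ q ∈ runsOf s, 1 ≤ q.2 := fun q hq => (hr2 q hq).2
  have hperm : (expand (runsOf s)).Perm (pairsOf vertices) := by
    have h1 : (expand (runsOf s)).Perm (pairsOf s) := by
      rw [List.perm_iff_count]
      intro p
      rw [count_expand (runsOf s) hr1 hpos p, count_pairsOf_sorted s hsort p,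
        cntR_runsOf s hsort p.1, cntR_runsOf s hsort p.2]
    exact h1.trans (pairsOf_perm (PySem.List.sorted_perm vertices (fun x => x) false))
  have hanti : ∀ a b : Int × Int, a ∈ PySem.List.sorted2 (pairsOf vertices) (·.1) (·.2) →
      b ∈ expand (runsOf s) → lexLE a b → lexLE b a → a = b := by
    intro a b _ _ hab hba
    rcases hab with h | ⟨h1, h2⟩ <;> rcases hba with g | ⟨g1, g2⟩ <;>
      (try omega) <;> exact Prod.ext (by omega) (by omega)
  have hlist : PySem.List.sorted2 (pairsOf vertices) (·.1) (·.2) = expand (runsOf s) :=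
    List.eq_of_perm_of_sorted hanti (sorted2_pairwise_lex _) (expand_pairwise _ hr1)
      ((PySem.List.sorted2_perm _ _ _ _).trans hperm.symm)
  simp only [config_to_key_py, A_pairs_eq, hlist, B_out_eq, hsdef]
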